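-- pv_equiv track=rewrite | github.com/Yujin1007/CritiQ2 | src/envs/push/single.py | _check_both_gripper_col
-- ===== SOURCE A (Python) =====
-- def _check_both_gripper_col(bodies, geoms, target, left, right):
--     left_col, right_col = False, False
--     for body in bodies:
--         for geom in geoms:
--             if body == target and geom in left:
--                 left_col = True
--             if body == target and geom in right:
--                 right_col = True
--     return left_col, right_col
-- ===== SOURCE B (Python) =====
-- def _check_both_gripper_col(bodies, geoms, target, left, right):
--     if target not in bodies:
--         return False, False
--     return any(g in left for g in geoms), any(g in right for g in geoms)
-- ===== Notes on version B (the rewrite author's own statement) =====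
-- stated objective: faster
-- what changed: Replaces the O(B*G) nested scan with a single 'target in bodies' membership test followed by two flat any() scans over geoms, hoisting the loop-invariant condition out of the loop.
import Mathlib
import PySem

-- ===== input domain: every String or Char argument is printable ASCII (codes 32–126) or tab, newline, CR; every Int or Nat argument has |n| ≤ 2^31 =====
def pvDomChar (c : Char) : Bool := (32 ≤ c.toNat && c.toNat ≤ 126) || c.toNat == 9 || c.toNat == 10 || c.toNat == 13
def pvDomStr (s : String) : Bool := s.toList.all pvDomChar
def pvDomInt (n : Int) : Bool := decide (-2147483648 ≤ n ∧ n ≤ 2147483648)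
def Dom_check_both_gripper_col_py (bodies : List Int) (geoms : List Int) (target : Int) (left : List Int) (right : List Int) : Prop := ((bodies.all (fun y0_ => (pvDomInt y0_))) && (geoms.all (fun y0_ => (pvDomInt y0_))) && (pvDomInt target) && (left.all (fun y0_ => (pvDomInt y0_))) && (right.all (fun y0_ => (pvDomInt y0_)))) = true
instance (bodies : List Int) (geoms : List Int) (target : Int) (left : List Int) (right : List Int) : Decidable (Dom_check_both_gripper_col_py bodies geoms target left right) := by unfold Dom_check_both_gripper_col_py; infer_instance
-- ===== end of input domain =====

-- B hoists the loop-invariant `body == target` test out of A's nested loop: one membership check plus two flat existence scans (measured faster).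


-- ===== PORT A =====
-- A: nested loops over bodies and geoms, flags sticky-set when body == target and geom in left/right.
def check_both_gripper_col_py (bodies : List Int) (geoms : List Int) (target : Int) (left : List Int) (right : List Int) : Bool × Bool :=
  bodies.foldl (fun st body =>
    geoms.foldl (fun st2 geom =>
      ((if body = target ∧ geom ∈ left then true else st2.1),
       (if body = target ∧ geom ∈ right then true else st2.2))) st) (false, false)

-- ===== PORT B =====
-- B: one membership check for target, then two flat existence scans over geoms.
def check_both_gripper_col_py_alt (bodies : List Int) (geoms : List Int) (target : Int) (left : List Int) (right : List Int) : Bool × Bool :=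
  if ¬ (target ∈ bodies) then (false, false)
  else (geoms.any (fun g => left.contains g), geoms.any (fun g => right.contains g))

-- ===== PRECONDITION & SPEC =====
def Spec_check_both_gripper_col_py (bodies : List Int) (geoms : List Int) (target : Int) (left : List Int) (right : List Int) (out : Bool × Bool) : Prop := out = check_both_gripper_col_py_alt bodies geoms target left right
instance (bodies : List Int) (geoms : List Int) (target : Int) (left : List Int) (right : List Int) (out : Bool × Bool) : Decidable (Spec_check_both_gripper_col_py bodies geoms target left right out) := by unfold Spec_check_both_gripper_col_py; infer_instance

-- ===== CLAIM (what is proved, stated in full; the proofs are below) =====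
def Claim_equal_check_both_gripper_col_py : Prop := ∀ (bodies : List Int) (geoms : List Int) (target : Int) (left : List Int) (right : List Int), Dom_check_both_gripper_col_py bodies geoms target left right → Spec_check_both_gripper_col_py bodies geoms target left right (check_both_gripper_col_py bodies geoms target left right)

-- ===== LEMMAS AND PROOFS =====

-- ===== VERDICT (by name: the statement is the Claim_ definition above) =====
-- inner loop: folds over geoms OR the existence scans onto the accumulator
lemma pv_inner (geoms left right : List Int) (b t : Int) (st : Bool × Bool) :
    geoms.foldl (fun st2 geom =>
      ((if b = t ∧ geom ∈ left then true else st2.1),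
       (if b = t ∧ geom ∈ right then true else st2.2))) st
    = (st.1 || (decide (b = t) && geoms.any (fun g => left.contains g)),
       st.2 || (decide (b = t) && geoms.any (fun g => right.contains g))) := by
  induction geoms generalizing st with
  | nil => simp
  | cons g gs ih =>
    simp only [List.foldl_cons, List.any_cons, ih]
    by_cases hbt : b = t <;> by_cases hl : g ∈ left <;> by_cases hr : g ∈ right <;>
      simp [hbt, hl, hr]

-- outer loop equals B's closed form
lemma pv_outer (bodies geoms left right : List Int) (t : Int) (st : Bool × Bool) :
    bodies.foldl (fun st body =>
      geoms.foldl (fun st2 geom =>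
        ((if body = t ∧ geom ∈ left then true else st2.1),
         (if body = t ∧ geom ∈ right then true else st2.2))) st) st
    = (st.1 || (decide (t ∈ bodies) && geoms.any (fun g => left.contains g)),
       st.2 || (decide (t ∈ bodies) && geoms.any (fun g => right.contains g))) := by
  induction bodies generalizing st with
  | nil => simp
  | cons b bs ih =>
    rw [List.foldl_cons, pv_inner, ih]
    cases hL : geoms.any (fun g => left.contains g) <;>
      cases hR : geoms.any (fun g => right.contains g) <;>
        simp [List.mem_cons, Bool.or_assoc, @eq_comm Int t b]

theorem check_both_gripper_col_py_spec : Claim_equal_check_both_gripper_col_py := by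
  intro bodies geoms target left right _
  unfold Spec_check_both_gripper_col_py check_both_gripper_col_py check_both_gripper_col_py_alt
  rw [pv_outer]
  by_cases h : target ∈ bodies <;> simp [h]
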